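-- pv_equiv track=rewrite | github.com/JovanXin/CP | NZOI/2021/full/2021_r1_3_threes.py | the_solution
-- ===== SOURCE A (Python) =====
-- NUM_TO_SOLVE = 5
--
-- def the_solution(num):
--     ans = 0
--     for i in range(len(num)):
--         d = int(num[i])  # The current digit
--         j = len(num) - i - 1
--         sj = j * (10 ** j) // 10
--         ans += d * sj
--
--         if d == NUM_TO_SOLVE:
--             ans += int("0" + num[i + 1 :]) + 1
--         elif d > NUM_TO_SOLVE:
--             ans += 10 ** j
--
--     return ans
-- ===== SOURCE B (Python) =====
-- NUM_TO_SOLVE = 5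
--
-- def the_solution(num):
--     # Reconstruct the integer N with per-character parsing, then count
--     # occurrences of the digit 5 in 0..N with the place-value formula.
--     n = 0
--     for ch in num:
--         n = n * 10 + int(ch)
--     ans = 0
--     p = 1
--     while p <= n:
--         high = n // (p * 10)
--         cur = (n // p) % 10
--         low = n % p
--         ans += high * p
--         if cur == NUM_TO_SOLVE:
--             ans += low + 1
--         elif cur > NUM_TO_SOLVE:
--             ans += p
--         p *= 10
--     return ans
-- ===== Notes on version B (the rewrite author's own statement) =====
-- stated objective: alternative
-- what changed: B reconstructs the integer N once by a single per-character pass (n = n*10 + int(ch)) and then counts occurrences of the digit 5 in 0..N with the closed-form place-value formula (high/cur/low per power of ten), instead of A's per-position loop that re-slices and re-parses the suffix string with int() at every index.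
import Mathlib
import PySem

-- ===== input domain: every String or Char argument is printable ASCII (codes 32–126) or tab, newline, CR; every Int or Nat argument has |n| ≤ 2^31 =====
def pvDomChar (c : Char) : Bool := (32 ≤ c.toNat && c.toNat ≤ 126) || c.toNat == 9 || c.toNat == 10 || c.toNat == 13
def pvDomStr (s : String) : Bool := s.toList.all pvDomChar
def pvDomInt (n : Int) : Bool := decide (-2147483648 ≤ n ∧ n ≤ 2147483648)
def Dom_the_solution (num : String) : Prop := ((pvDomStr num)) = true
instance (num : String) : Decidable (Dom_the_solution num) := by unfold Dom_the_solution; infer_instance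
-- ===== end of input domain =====

-- B re-implements A's per-position suffix-reparsing digit count by rebuilding the integer once
-- and applying the place-value counting formula; equivalence is proved on all-digit strings.

-- ===== PORT A =====
-- Literal port of A's loop.  num[i] is always in range (i ∈ range(len(num))), so the
-- IndexError-free pyGetD is exact here; int(num[i]) and int("0" + num[i+1:]) are
-- PySem.Int.ofChars? whose `none` (ValueError on a non-digit character) is excluded by
-- Pre_the_solution, so `.getD 0` is never the default inside Pre_.  j ≥ 0 on every
-- iteration, so Python's 10 ** j is exactly 10 ^ j.toNat.
def the_solution (num : String) : Int :=
  (PySem.List.pyRange 0 (num.toList.length : Int) 1).foldl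
    (fun ans i =>
      let d : Int := (PySem.Int.ofChars? [PySem.List.pyGetD num.toList i ' ']).getD 0
      let j : Int := (num.toList.length : Int) - i - 1
      let sj : Int := PySem.Int.floordiv (j * 10 ^ j.toNat) 10
      let ans1 : Int := ans + d * sj
      if d = 5 then ans1 + ((PySem.Int.ofChars? ('0' :: PySem.List.slice num.toList (some (i + 1)) none)).getD 0 + 1)
      else if 5 < d then ans1 + 10 ^ j.toNat
      else ans1)
    0

-- ===== PORT B =====
-- The while-loop of Source B: p runs over 1, 10, 100, … while p ≤ n.  The fuel argument is a
-- pure totality guard (the loop runs at most n.toNat + 1 times since p at least doubles);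
-- it never changes the computed value on the calls the port makes.
def altCountLoop (fuel : Nat) (n : Int) (p : Nat) (ans : Int) : Int :=
  match fuel with
  | 0 => ans
  | f + 1 =>
    if (p : Int) ≤ n then
      let high := PySem.Int.floordiv n ((p : Int) * 10)
      let cur := PySem.Int.mod (PySem.Int.floordiv n (p : Int)) 10
      let low := PySem.Int.mod n (p : Int)
      let ans1 := ans + high * (p : Int)
      let ans2 := if cur = 5 then ans1 + low + 1 else if 5 < cur then ans1 + (p : Int) else ans1
      altCountLoop f n (p * 10) ans2
    else ans

def the_solution_alt (num : String) : Int :=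
  let n : Int := num.toList.foldl (fun a c => a * 10 + (PySem.Int.ofChars? [c]).getD 0) 0
  altCountLoop (n.toNat + 1) n 1 0

-- ===== PRECONDITION & SPEC =====
-- Exactly the inputs on which A returns: int() raises ValueError at the first
-- non-digit character, so A returns normally iff every character is an ASCII digit
-- (the empty string is admitted: the loop body never runs and A returns 0).
def Pre_the_solution (num : String) : Prop := num.toList.all PySem.Chars.isdigit = true
instance (num : String) : Decidable (Pre_the_solution num) := by unfold Pre_the_solution; infer_instance

def pvWitness_the_solution : String := "2550"

def Spec_the_solution (num : String) (out : Int) : Prop := out = the_solution_alt num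
instance (num : String) (out : Int) : Decidable (Spec_the_solution num out) := by unfold Spec_the_solution; infer_instance

-- ===== CLAIM (what is proved, stated in full; the proofs are below) =====
def Claim_equal_the_solution : Prop := ∀ (num : String), Dom_the_solution num → Pre_the_solution num → Spec_the_solution num (the_solution num)

-- ===== LEMMAS AND PROOFS =====

-- digit value of a character, and the value of a digit string (Python's int of it)
def dN (c : Char) : Nat := c.toNat - '0'.toNat

def natNA (cs : List Char) (acc : Nat) : Nat :=
  cs.foldl (fun a c => a * 10 + (c.toNat - '0'.toNat)) acc

def natN (cs : List Char) : Nat := natNA cs 0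

-- the per-index summand of A's loop, and A's total as a sum over indices
def fA (cs : List Char) (k : Nat) : Int :=
  if (((cs.getD k ' ').toNat - '0'.toNat : Nat) : Int) = 5 then
    (((cs.getD k ' ').toNat - '0'.toNat : Nat) : Int)
        * (((cs.length - 1 - k) * 10 ^ (cs.length - 1 - k) / 10 : Nat) : Int)
      + (((natNA (cs.drop (k + 1)) 0 : Nat) : Int) + 1)
  else if 5 < (((cs.getD k ' ').toNat - '0'.toNat : Nat) : Int) then
    (((cs.getD k ' ').toNat - '0'.toNat : Nat) : Int)
        * (((cs.length - 1 - k) * 10 ^ (cs.length - 1 - k) / 10 : Nat) : Int)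
      + ((10 ^ (cs.length - 1 - k) : Nat) : Int)
  else
    (((cs.getD k ' ').toNat - '0'.toNat : Nat) : Int)
        * (((cs.length - 1 - k) * 10 ^ (cs.length - 1 - k) / 10 : Nat) : Int)

def sumA (cs : List Char) : Int := ((List.range cs.length).map (fA cs)).sum

def valSum (cs : List Char) : Int :=
  ((List.range cs.length).map
    (fun k => (((cs.getD k ' ').toNat - '0'.toNat : Nat) : Int) * ((10 ^ (cs.length - 1 - k) : Nat) : Int))).sum

def C5 (cs : List Char) : Int :=
  ((List.range cs.length).map
    (fun k => if (((cs.getD k ' ').toNat - '0'.toNat : Nat) : Int) = 5 then (1 : Int) else 0)).sum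

def bonus5 (d : Int) : Int := if d = 5 then 1 else if 5 < d then 1 else 0

-- count of places whose digit is 5 (mirrors altCountLoop's traversal)
def cnt5 (fuel : Nat) (n : Int) (p : Nat) : Int :=
  match fuel with
  | 0 => 0
  | f + 1 =>
    if (p : Int) ≤ n then
      (if PySem.Int.mod (PySem.Int.floordiv n (p : Int)) 10 = 5 then (1 : Int) else 0) + cnt5 f n (p * 10)
    else 0

def balt (m : Int) : Int := altCountLoop (m.toNat + 1) m 1 0
def cntN (m : Int) : Int := cnt5 (m.toNat + 1) m 1

theorem charOfDigit (c : Char) (h : PySem.Chars.isdigit c = true) :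
    c = '0' ∨ c = '1' ∨ c = '2' ∨ c = '3' ∨ c = '4' ∨ c = '5' ∨ c = '6' ∨ c = '7' ∨ c = '8' ∨ c = '9' := by
  simp [PySem.Chars.isdigit] at h
  obtain ⟨h1, h2⟩ := h
  have hb : 48 ≤ c.toNat ∧ c.toNat ≤ 57 := ⟨h1, h2⟩
  have h10 : c.toNat = 48 ∨ c.toNat = 49 ∨ c.toNat = 50 ∨ c.toNat = 51 ∨ c.toNat = 52 ∨ c.toNat = 53
      ∨ c.toNat = 54 ∨ c.toNat = 55 ∨ c.toNat = 56 ∨ c.toNat = 57 := by omega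
  rcases h10 with h|h|h|h|h|h|h|h|h|h <;>
    rw [← Char.ofNat_toNat c, h] <;> decide

theorem digit_bounds (c : Char) (h : PySem.Chars.isdigit c = true) :
    48 ≤ c.toNat ∧ c.toNat ≤ 57 := by
  simp [PySem.Chars.isdigit] at h
  exact ⟨h.1, h.2⟩

theorem digit_not_space (c : Char) (h : PySem.Chars.isdigit c = true) :
    PySem.Int.isIntSpace c = false := by
  rcases charOfDigit c h with h|h|h|h|h|h|h|h|h|h <;> subst h <;> decide

theorem dropWhile_eq_self_of_head {p : Char → Bool} :
    ∀ l : List Char, (∀ x ∈ l, p x = false) → l.dropWhile p = l := by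
  intro l hl
  cases l with
  | nil => rfl
  | cons a l =>
    have : p a = false := hl a (List.mem_cons_self)
    simp [this]

-- the private digit-run parser of PySem.Int.ofChars?, captured by unification
theorem parse_exists :
    ∃ g : List Char → Bool → Nat → Option Nat,
      (PySem.Int.ofChars? = fun s =>
        have cs := (List.dropWhile PySem.Int.isIntSpace (List.dropWhile PySem.Int.isIntSpace s).reverse).reverse
        match cs with
        | '-' :: ds =>
          Option.map (fun n => -n) do
            let a ← (match ds with | [] => none | cs => g cs false 0 : Option Nat)
            pure ((a : Nat) : Int)
        | '+' :: ds =>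
          Option.map (fun n => n) do
            let a ← (match ds with | [] => none | cs => g cs false 0 : Option Nat)
            pure ((a : Nat) : Int)
        | ds =>
          Option.map (fun n => n) do
            let a ← (match ds with | [] => none | cs => g cs false 0 : Option Nat)
            pure ((a : Nat) : Int))
      ∧ (∀ ds acc, ds.all PySem.Chars.isdigit = true → g ds true acc = some (natNA ds acc))
      ∧ (∀ c cs, PySem.Chars.isdigit c = true →
            g (c :: cs) false 0 = g cs true (0 * 10 + (c.toNat - '0'.toNat))) := by
  refine ⟨_, rfl, ?_, ?_⟩
  · intro ds
    induction ds with
    | nil => intro acc _; rfl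
    | cons c cs ih =>
      intro acc hall
      simp only [List.all_cons, Bool.and_eq_true] at hall
      obtain ⟨hc, hcs⟩ := hall
      rcases charOfDigit c hc with h|h|h|h|h|h|h|h|h|h <;> subst h <;>
        exact (ih _ hcs).trans rfl
  · intro c cs hc
    rcases charOfDigit c hc with h|h|h|h|h|h|h|h|h|h <;> subst h <;> rfl

theorem parse0 (cs : List Char) (h : cs.all PySem.Chars.isdigit = true) :
    PySem.Int.ofChars? ('0' :: cs) = some ((natN cs : Nat) : Int) := by
  obtain ⟨g, hg, h2, h3⟩ := parse_exists
  have hall : ∀ x ∈ ('0' :: cs), PySem.Int.isIntSpace x = false := by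
    intro x hx
    rcases List.mem_cons.mp hx with h' | h'
    · subst h'; decide
    · exact digit_not_space x (by
        have := List.all_eq_true.mp h x h'
        simpa using this)
  have e1 : (List.dropWhile PySem.Int.isIntSpace
      (List.dropWhile PySem.Int.isIntSpace ('0' :: cs)).reverse).reverse = '0' :: cs := by
    rw [dropWhile_eq_self_of_head ('0' :: cs) hall]
    rw [dropWhile_eq_self_of_head (('0' :: cs).reverse)
      (by intro x hx; exact hall x (List.mem_reverse.mp hx))]
    exact List.reverse_reverse _
  rw [hg]
  show (match (List.dropWhile PySem.Int.isIntSpace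
      (List.dropWhile PySem.Int.isIntSpace ('0' :: cs)).reverse).reverse with
    | '-' :: ds =>
      Option.map (fun n => -n) do
        let a ← (match ds with | [] => none | cs => g cs false 0 : Option Nat)
        pure ((a : Nat) : Int)
    | '+' :: ds =>
      Option.map (fun n => n) do
        let a ← (match ds with | [] => none | cs => g cs false 0 : Option Nat)
        pure ((a : Nat) : Int)
    | ds =>
      Option.map (fun n => n) do
        let a ← (match ds with | [] => none | cs => g cs false 0 : Option Nat)
        pure ((a : Nat) : Int)) = some ((natN cs : Nat) : Int)
  rw [e1]
  show Option.map (fun n => n) (do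
      let a ← (g ('0' :: cs) false 0 : Option Nat)
      pure ((a : Nat) : Int)) = some ((natN cs : Nat) : Int)
  rw [h3 '0' cs (by decide), h2 cs _ h]
  show some (((natNA cs (0 * 10 + ('0'.toNat - '0'.toNat)) : Nat) : Int)) = _
  norm_num [natN]

theorem parse1 (c : Char) (h : PySem.Chars.isdigit c = true) :
    (PySem.Int.ofChars? [c]).getD 0 = ((c.toNat - '0'.toNat : Nat) : Int) := by
  rcases charOfDigit c h with h|h|h|h|h|h|h|h|h|h <;> subst h <;> decide


-- ---- elementary value lemmas ----

theorem natNA_append (xs ys : List Char) (a : Nat) :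
    natNA (xs ++ ys) a = natNA ys (natNA xs a) := by
  simp [natNA, List.foldl_append]

theorem natNA_snoc (xs : List Char) (c : Char) :
    natNA (xs ++ [c]) 0 = natNA xs 0 * 10 + (c.toNat - '0'.toNat) := by
  rw [natNA_append]; rfl

theorem natNA_shift : ∀ (cs : List Char) (a : Nat),
    natNA cs a = a * 10 ^ cs.length + natN cs := by
  intro cs
  induction cs with
  | nil => intro a; simp [natNA, natN]
  | cons c cs ih =>
    intro a
    have h1 : natNA (c :: cs) a = natNA cs (a * 10 + (c.toNat - '0'.toNat)) := rfl
    have h2 : natN (c :: cs) = natNA cs (c.toNat - '0'.toNat) := by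
      simp [natN, natNA]
    rw [h1, ih, h2, ih (c.toNat - '0'.toNat)]
    simp only [List.length_cons, pow_succ]
    ring

theorem sj_closed (t : Nat) (ht : 1 ≤ t) : t * 10 ^ t / 10 = t * 10 ^ (t - 1) := by
  obtain ⟨s, rfl⟩ : ∃ s, t = s + 1 := ⟨t - 1, by omega⟩
  rw [pow_succ, ← mul_assoc, Nat.mul_div_cancel _ (by norm_num)]
  simp

theorem SS (j : Nat) : (j + 1) * 10 ^ (j + 1) / 10 = 10 * (j * 10 ^ j / 10) + 10 ^ j := by
  cases j with
  | zero => norm_num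
  | succ m =>
    rw [sj_closed (m + 1 + 1) (by omega), sj_closed (m + 1) (by omega)]
    simp [pow_succ]
    ring

theorem sum_map_smul (c : Int) : ∀ (l : List Nat) (f : Nat → Int),
    (l.map (fun k => c * f k)).sum = c * (l.map f).sum := by
  intro l
  induction l with
  | nil => intro f; simp
  | cons a l ih => intro f; simp [ih]; ring

theorem valSum_eq_natN : ∀ cs : List Char, valSum cs = ((natN cs : Nat) : Int) := by
  intro cs
  induction cs with
  | nil => simp [valSum, natN, natNA]
  | cons c cs ih =>
    have hlen : (c :: cs).length = cs.length + 1 := rfl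
    have hshape : valSum (c :: cs)
        = (((c.toNat - '0'.toNat : Nat) : Int)) * ((10 ^ cs.length : Nat) : Int) + valSum cs := by
      unfold valSum
      rw [hlen, List.range_succ_eq_map, List.map_cons, List.sum_cons, List.map_map]
      have emap : (List.range cs.length).map
            ((fun k => ((((c :: cs).getD k ' ').toNat - '0'.toNat : Nat) : Int)
              * ((10 ^ ((c :: cs).length - 1 - k) : Nat) : Int)) ∘ Nat.succ)
          = (List.range cs.length).map
            (fun k => (((cs.getD k ' ').toNat - '0'.toNat : Nat) : Int)
              * ((10 ^ (cs.length - 1 - k) : Nat) : Int)) := by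
        apply List.map_congr_left
        intro k _
        have e1 : (c :: cs).getD (k + 1) ' ' = cs.getD k ' ' := rfl
        have e2 : (c :: cs).length - 1 - (k + 1) = cs.length - 1 - k := by
          rw [hlen]; omega
        simp only [Function.comp_apply, e1, e2]
      rw [hlen] at emap
      rw [emap]
      have e3 : (((c :: cs).getD 0 ' ').toNat - '0'.toNat : Nat) = c.toNat - '0'.toNat := rfl
      have e4 : cs.length + 1 - 1 - 0 = cs.length := by omega
      rw [e3, e4]
    rw [hshape, ih]
    have h2 : natN (c :: cs) = natNA cs (c.toNat - '0'.toNat) := by simp [natN, natNA]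
    rw [h2, natNA_shift]
    push_cast
    ring

-- ---- getD / drop on snoc ----

theorem getD_append_left (cs : List Char) (c x : Char) (k : Nat) (h : k < cs.length) :
    (cs ++ [c]).getD k x = cs.getD k x := by
  simp [List.getD_eq_getElem?_getD, List.getElem?_append_left h]

theorem getD_append_last (cs : List Char) (c x : Char) :
    (cs ++ [c]).getD cs.length x = c := by
  simp [List.getD_eq_getElem?_getD, List.getElem?_concat_length]

-- ---- snoc laws for the A-side sums ----

theorem fA_snoc (cs : List Char) (c : Char) (k : Nat) (hk : k < cs.length) :
    fA (cs ++ [c]) k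
      = 10 * fA cs k
        + (((cs.getD k ' ').toNat - '0'.toNat : Nat) : Int) * ((10 ^ (cs.length - 1 - k) : Nat) : Int)
        + (if (((cs.getD k ' ').toNat - '0'.toNat : Nat) : Int) = 5
            then ((c.toNat - '0'.toNat : Nat) : Int) - 9 else 0) := by
  have hget : (cs ++ [c]).getD k ' ' = cs.getD k ' ' := getD_append_left cs c ' ' k hk
  have hlen : (cs ++ [c]).length = cs.length + 1 := by simp
  have hj : (cs ++ [c]).length - 1 - k = (cs.length - 1 - k) + 1 := by
    rw [hlen]; omega
  have hdrop : (cs ++ [c]).drop (k + 1) = cs.drop (k + 1) ++ [c] :=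
    List.drop_append_of_le_length (by omega)
  unfold fA
  rw [hget, hj, hdrop, natNA_snoc, SS]
  split_ifs <;> push_cast <;> ring

theorem fA_last (cs : List Char) (c : Char) :
    fA (cs ++ [c]) cs.length = bonus5 ((c.toNat - '0'.toNat : Nat) : Int) := by
  have hget : (cs ++ [c]).getD cs.length ' ' = c := getD_append_last cs c ' '
  have hlen : (cs ++ [c]).length = cs.length + 1 := by simp
  have hj : (cs ++ [c]).length - 1 - cs.length = 0 := by rw [hlen]; omega
  have hdrop : (cs ++ [c]).drop (cs.length + 1) = [] :=
    List.drop_eq_nil_of_le (by simp)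
  unfold fA bonus5
  rw [hget, hj, hdrop]
  simp only [natNA, List.foldl_nil]
  split_ifs <;> norm_num

theorem C5_snoc (cs : List Char) (c : Char) :
    C5 (cs ++ [c]) = C5 cs + (if ((c.toNat - '0'.toNat : Nat) : Int) = 5 then (1 : Int) else 0) := by
  unfold C5
  have hlen : (cs ++ [c]).length = cs.length + 1 := by simp
  rw [hlen, List.range_succ, List.map_append, List.sum_append]
  congr 1
  · apply congrArg
    apply List.map_congr_left
    intro k hk
    rw [getD_append_left cs c ' ' k (List.mem_range.mp hk)]
  · simp [getD_append_last]

theorem sumA_snoc (cs : List Char) (c : Char) :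
    sumA (cs ++ [c])
      = 10 * sumA cs + valSum cs
        + (((c.toNat - '0'.toNat : Nat) : Int) - 9) * C5 cs
        + bonus5 ((c.toNat - '0'.toNat : Nat) : Int) := by
  unfold sumA
  have hlen : (cs ++ [c]).length = cs.length + 1 := by simp
  rw [hlen, List.range_succ, List.map_append, List.sum_append]
  have hmap : (List.range cs.length).map (fA (cs ++ [c]))
      = (List.range cs.length).map (fun k =>
          10 * fA cs k
          + (((cs.getD k ' ').toNat - '0'.toNat : Nat) : Int) * ((10 ^ (cs.length - 1 - k) : Nat) : Int)
          + (if (((cs.getD k ' ').toNat - '0'.toNat : Nat) : Int) = 5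
              then ((c.toNat - '0'.toNat : Nat) : Int) - 9 else 0)) := by
    apply List.map_congr_left
    intro k hk
    exact fA_snoc cs c k (List.mem_range.mp hk)
  rw [hmap]
  rw [PySem.List.sum_map_add_int, PySem.List.sum_map_add_int]
  rw [sum_map_smul]
  have hite : (List.range cs.length).map (fun k =>
        if (((cs.getD k ' ').toNat - '0'.toNat : Nat) : Int) = 5
          then ((c.toNat - '0'.toNat : Nat) : Int) - 9 else 0)
      = (List.range cs.length).map (fun k =>
          (((c.toNat - '0'.toNat : Nat) : Int) - 9)
          * (if (((cs.getD k ' ').toNat - '0'.toNat : Nat) : Int) = 5 then (1 : Int) else 0)) := by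
    apply List.map_congr_left
    intro k _
    split_ifs <;> ring
  rw [hite, sum_map_smul, List.map_singleton, List.sum_singleton, fA_last]
  unfold valSum C5
  ring

-- ---- A's loop as the sum over indices ----

theorem A1 (num : String) (h : Pre_the_solution num) : the_solution num = sumA num.toList := by
  unfold the_solution
  unfold Pre_the_solution at h
  have hcong : ∀ (acc : Int), ∀ i ∈ PySem.List.pyRange 0 (num.toList.length : Int) 1,
      (fun ans i =>
        let d : Int := (PySem.Int.ofChars? [PySem.List.pyGetD num.toList i ' ']).getD 0
        let j : Int := (num.toList.length : Int) - i - 1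
        let sj : Int := PySem.Int.floordiv (j * 10 ^ j.toNat) 10
        let ans1 : Int := ans + d * sj
        if d = 5 then ans1 + ((PySem.Int.ofChars? ('0' :: PySem.List.slice num.toList (some (i + 1)) none)).getD 0 + 1)
        else if 5 < d then ans1 + 10 ^ j.toNat
        else ans1) acc i
      = (fun ans i => ans + fA num.toList i.toNat) acc i := by
    intro acc i hi
    rw [PySem.List.mem_pyRange_one] at hi
    obtain ⟨h0, hlt⟩ := hi
    obtain ⟨k, rfl⟩ : ∃ k : Nat, i = (k : Int) := ⟨i.toNat, (Int.toNat_of_nonneg h0).symm⟩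
    have hk : k < num.toList.length := by exact_mod_cast hlt
    have hmem : num.toList.getD k ' ' ∈ num.toList := by
      rw [List.getD_eq_getElem _ _ hk]
      exact List.getElem_mem hk
    have hdig : PySem.Chars.isdigit (num.toList.getD k ' ') = true :=
      List.all_eq_true.mp h _ hmem
    have e_get : PySem.List.pyGetD num.toList (k : Int) ' ' = num.toList.getD k ' ' := by
      simp
    have e_j : (num.toList.length : Int) - (k : Int) - 1 = ((num.toList.length - 1 - k : Nat) : Int) := by
      push_cast [hk]
      omega
    have e_jn : ((num.toList.length : Int) - (k : Int) - 1).toNat = num.toList.length - 1 - k := by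
      rw [e_j, Int.toNat_natCast]
    have e_sj : PySem.Int.floordiv (((num.toList.length - 1 - k : Nat) : Int)
          * 10 ^ (num.toList.length - 1 - k)) 10
        = (((num.toList.length - 1 - k) * 10 ^ (num.toList.length - 1 - k) / 10 : Nat) : Int) := by
      have e : (((num.toList.length - 1 - k : Nat) : Int) * 10 ^ (num.toList.length - 1 - k))
          = (((num.toList.length - 1 - k) * 10 ^ (num.toList.length - 1 - k) : Nat) : Int) := by
        push_cast; ring
      rw [e]
      exact_mod_cast PySem.Int.floordiv_natCast ((num.toList.length - 1 - k) * 10 ^ (num.toList.length - 1 - k)) 10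
    have e_slice : PySem.List.slice num.toList (some ((k : Int) + 1)) none = num.toList.drop (k + 1) := by
      rw [show ((k : Int) + 1) = ((k + 1 : Nat) : Int) by push_cast; ring]
      exact PySem.List.slice_from_natCast num.toList (k + 1)
    have hdropdig : (num.toList.drop (k + 1)).all PySem.Chars.isdigit = true := by
      rw [List.all_eq_true]
      intro x hx
      exact List.all_eq_true.mp h x (List.mem_of_mem_drop hx)
    simp only [e_get, e_j, e_jn, e_sj, e_slice, Int.toNat_natCast]
    rw [parse1 _ hdig, parse0 _ hdropdig]
    unfold fA natN
    simp only [Option.getD_some, Int.toNat_natCast]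
    split_ifs <;> push_cast <;> ring
  rw [PySem.List.foldl_congr_mem _ _ _ 0 hcong]
  rw [PySem.List.foldl_add]
  rw [PySem.List.pyRange_zero]
  rw [List.map_map]
  have : ((List.range ((num.toList.length : Int)).toNat).map
        ((fun i => fA num.toList i.toNat) ∘ (fun k : Nat => (k : Int))))
      = (List.range num.toList.length).map (fA num.toList) := by
    simp [Function.comp]
  rw [this]
  unfold sumA
  ring

-- ---- B's parse as natN ----

theorem foldInt : ∀ (cs : List Char) (a : Nat),
    cs.foldl (fun x c => x * 10 + ((c.toNat - '0'.toNat : Nat) : Int)) ((a : Nat) : Int)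
      = ((natNA cs a : Nat) : Int) := by
  intro cs
  induction cs with
  | nil => intro a; rfl
  | cons c cs ih =>
    intro a
    have e : ((a : Nat) : Int) * 10 + ((c.toNat - '0'.toNat : Nat) : Int)
        = ((a * 10 + (c.toNat - '0'.toNat) : Nat) : Int) := by push_cast; ring
    show cs.foldl _ (((a : Nat) : Int) * 10 + ((c.toNat - '0'.toNat : Nat) : Int)) = _
    rw [e, ih]
    rfl

theorem B1 (num : String) (h : Pre_the_solution num) :
    the_solution_alt num = balt ((natN num.toList : Nat) : Int) := by
  unfold the_solution_alt balt
  unfold Pre_the_solution at h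
  have hfold : num.toList.foldl (fun a c => a * 10 + (PySem.Int.ofChars? [c]).getD 0) 0
      = ((natN num.toList : Nat) : Int) := by
    have hcong : ∀ (acc : Int), ∀ c ∈ num.toList,
        (fun a c => a * 10 + (PySem.Int.ofChars? [c]).getD 0) acc c
          = (fun a c => a * 10 + ((c.toNat - '0'.toNat : Nat) : Int)) acc c := by
      intro acc c hc
      show acc * 10 + (PySem.Int.ofChars? [c]).getD 0
          = acc * 10 + ((c.toNat - '0'.toNat : Nat) : Int)
      rw [parse1 c (List.all_eq_true.mp h c hc)]
    rw [PySem.List.foldl_congr_mem _ _ _ 0 hcong]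
    have h0 : (0 : Int) = ((0 : Nat) : Int) := by norm_num
    rw [h0, foldInt]
    rfl
  rw [hfold]

-- ---- arithmetic of the place-value loop ----

theorem divmodstep (n dv q : Int) (hn : 0 ≤ n) (hdv0 : 0 ≤ dv) (hdv9 : dv ≤ 9) (hq : 1 ≤ q) :
    PySem.Int.floordiv (10 * n + dv) (q * 10) = PySem.Int.floordiv n q
    ∧ PySem.Int.mod (10 * n + dv) (q * 10) = 10 * PySem.Int.mod n q + dv := by
  have hq0 : (0 : Int) < q := by omega
  have hq10 : (0 : Int) < q * 10 := by positivity
  rw [PySem.Int.floordiv_eq_ediv_of_pos hq10, PySem.Int.floordiv_eq_ediv_of_pos hq0,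
      PySem.Int.mod_eq_emod_of_pos hq10, PySem.Int.mod_eq_emod_of_pos hq0]
  have hr0 : 0 ≤ n % q := Int.emod_nonneg n (by omega)
  have hrq : n % q < q := Int.emod_lt_of_pos n hq0
  have hdecomp : n % q + q * (n / q) = n := Int.emod_add_ediv n q
  have key : 10 * n + dv = (10 * (n % q) + dv) + (n / q) * (q * 10) := by
    linear_combination (-10) * hdecomp
  constructor
  · rw [key, Int.add_mul_ediv_right _ _ (by omega : q * 10 ≠ 0),
        Int.ediv_eq_zero_of_lt (by omega) (by omega), zero_add]
  · have key2 : 10 * n + dv = (10 * (n % q) + dv) + (q * 10) * (n / q) := by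
      linear_combination (-10) * hdecomp
    rw [key2, Int.add_mul_emod_self_left,
        Int.emod_eq_of_lt (by omega) (by omega)]

theorem accA : ∀ (f : Nat) (n : Int) (p : Nat) (a : Int),
    altCountLoop f n p a = a + altCountLoop f n p 0 := by
  intro f
  induction f with
  | zero => intro n p a; simp [altCountLoop]
  | succ f ih =>
    intro n p a
    by_cases hg : (p : Int) ≤ n
    · simp only [altCountLoop, if_pos hg]
      conv_lhs => rw [ih n (p * 10)]
      conv_rhs => rw [ih n (p * 10)]
      split_ifs <;> ring
    · simp [altCountLoop, hg]

theorem suffA : ∀ (f f' : Nat) (n : Int) (p : Nat) (a : Int), 1 ≤ p →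
    n.toNat + 1 - p ≤ f → n.toNat + 1 - p ≤ f' →
    altCountLoop f n p a = altCountLoop f' n p a := by
  intro f
  induction f with
  | zero =>
    intro f' n p a hp h1 h2
    have hg : ¬ ((p : Int) ≤ n) := by omega
    cases f' with
    | zero => rfl
    | succ f' => simp [altCountLoop, hg]
  | succ f ih =>
    intro f' n p a hp h1 h2
    cases f' with
    | zero =>
      have hg : ¬ ((p : Int) ≤ n) := by omega
      simp [altCountLoop, hg]
    | succ f' =>
      by_cases hg : (p : Int) ≤ n
      · simp only [altCountLoop, if_pos hg]
        exact ih f' n (p * 10) _ (by omega) (by omega) (by omega)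
      · simp [altCountLoop, hg]

theorem suffC : ∀ (f f' : Nat) (n : Int) (p : Nat), 1 ≤ p →
    n.toNat + 1 - p ≤ f → n.toNat + 1 - p ≤ f' →
    cnt5 f n p = cnt5 f' n p := by
  intro f
  induction f with
  | zero =>
    intro f' n p hp h1 h2
    have hg : ¬ ((p : Int) ≤ n) := by omega
    cases f' with
    | zero => rfl
    | succ f' => simp [cnt5, hg]
  | succ f ih =>
    intro f' n p hp h1 h2
    cases f' with
    | zero =>
      have hg : ¬ ((p : Int) ≤ n) := by omega
      simp [cnt5, hg]
    | succ f' =>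
      by_cases hg : (p : Int) ≤ n
      · simp only [cnt5, if_pos hg]
        rw [ih f' n (p * 10) (by omega) (by omega) (by omega)]
      · simp [cnt5, hg]

theorem guard_iff (n dv : Int) (p : Nat) (hdv0 : 0 ≤ dv) (hdv9 : dv ≤ 9) :
    (((p * 10 : Nat) : Int) ≤ 10 * n + dv) ↔ ((p : Int) ≤ n) := by
  push_cast
  omega

theorem mainB : ∀ (f : Nat) (n dv : Int) (p : Nat), 0 ≤ n → 0 ≤ dv → dv ≤ 9 → 1 ≤ p →
    altCountLoop f (10 * n + dv) (p * 10) 0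
      = 10 * altCountLoop f n p 0 + (dv - 9) * cnt5 f n p := by
  intro f
  induction f with
  | zero => intro n dv p hn h0 h9 hp; simp [altCountLoop, cnt5]
  | succ f ih =>
    intro n dv p hn h0 h9 hp
    by_cases hg : (p : Int) ≤ n
    · have hgm : ((p * 10 : Nat) : Int) ≤ 10 * n + dv := (guard_iff n dv p h0 h9).mpr hg
      simp only [altCountLoop, cnt5, if_pos hg, if_pos hgm]
      rw [accA f (10 * n + dv) (p * 10 * 10), accA f n (p * 10)]
      rw [ih n dv (p * 10) hn h0 h9 (by omega)]
      have ecast : ((p * 10 : Nat) : Int) = (p : Int) * 10 := by push_cast; ring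
      have hp1 : (1 : Int) ≤ (p : Int) := by exact_mod_cast hp
      obtain ⟨ed1, em1⟩ := divmodstep n dv ((p : Int) * 10) hn h0 h9 (by omega)
      obtain ⟨ed2, em2⟩ := divmodstep n dv (p : Int) hn h0 h9 hp1
      have ehigh : PySem.Int.floordiv (10 * n + dv) (((p * 10 : Nat) : Int) * 10)
          = PySem.Int.floordiv n ((p : Int) * 10) := by rw [ecast]; exact ed1
      have ecur : PySem.Int.floordiv (10 * n + dv) ((p * 10 : Nat) : Int)
          = PySem.Int.floordiv n (p : Int) := by rw [ecast]; exact ed2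
      have elow : PySem.Int.mod (10 * n + dv) ((p * 10 : Nat) : Int)
          = 10 * PySem.Int.mod n (p : Int) + dv := by rw [ecast]; exact em2
      rw [ehigh, ecur, elow, ecast]
      split_ifs <;> push_cast <;> ring
    · have hgm2 : ¬ ((p : Int) * 10 ≤ 10 * n + dv) := by
        intro hx; exact hg (by omega)
      simp [altCountLoop, cnt5, hg, hgm2]

theorem shiftC : ∀ (f : Nat) (n dv : Int) (p : Nat), 0 ≤ n → 0 ≤ dv → dv ≤ 9 → 1 ≤ p →
    cnt5 f (10 * n + dv) (p * 10) = cnt5 f n p := by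
  intro f
  induction f with
  | zero => intro n dv p hn h0 h9 hp; rfl
  | succ f ih =>
    intro n dv p hn h0 h9 hp
    by_cases hg : (p : Int) ≤ n
    · have hgm : ((p * 10 : Nat) : Int) ≤ 10 * n + dv := (guard_iff n dv p h0 h9).mpr hg
      simp only [cnt5, if_pos hg, if_pos hgm]
      rw [ih n dv (p * 10) hn h0 h9 (by omega)]
      have ecast : ((p * 10 : Nat) : Int) = (p : Int) * 10 := by push_cast; ring
      obtain ⟨ed2, _⟩ := divmodstep n dv (p : Int) hn h0 h9 (by exact_mod_cast hp)

      have ecur : PySem.Int.floordiv (10 * n + dv) ((p * 10 : Nat) : Int)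
          = PySem.Int.floordiv n (p : Int) := by rw [ecast]; exact ed2
      rw [ecur]
    · have hgm2 : ¬ ((p : Int) * 10 ≤ 10 * n + dv) := by
        intro hx; exact hg (by omega)
      simp [cnt5, hg, hgm2]

theorem floordiv_one (m : Int) : PySem.Int.floordiv m 1 = m := by
  rw [PySem.Int.floordiv_eq_ediv_of_pos (by norm_num)]
  exact Int.ediv_one m

theorem mod_one (m : Int) : PySem.Int.mod m 1 = 0 := by
  rw [PySem.Int.mod_eq_emod_of_pos (by norm_num)]
  exact Int.emod_one m

theorem BRec (n dv : Int) (hn : 0 ≤ n) (h0 : 0 ≤ dv) (h9 : dv ≤ 9) :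
    balt (10 * n + dv) = 10 * balt n + n + (dv - 9) * cntN n + bonus5 dv := by
  by_cases hm : 10 * n + dv ≤ 0
  · have hn0 : n = 0 := by omega
    have hd0 : dv = 0 := by omega
    subst hn0; subst hd0
    norm_num [balt, cntN, bonus5, altCountLoop, cnt5]
  · have hm1 : 1 ≤ 10 * n + dv := by omega
    set m : Int := 10 * n + dv with hmdef
    have hfuel : m.toNat + 1 = (m.toNat) + 1 := rfl
    have hstep : balt m = altCountLoop (m.toNat) m (1 * 10)
        (if PySem.Int.mod (PySem.Int.floordiv m 1) 10 = 5
          then 0 + PySem.Int.floordiv m ((1 : Int) * 10) * (1 : Int) + PySem.Int.mod m 1 + 1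
          else if 5 < PySem.Int.mod (PySem.Int.floordiv m 1) 10
            then 0 + PySem.Int.floordiv m ((1 : Int) * 10) * (1 : Int) + (1 : Int)
            else 0 + PySem.Int.floordiv m ((1 : Int) * 10) * (1 : Int)) := by
      show altCountLoop (m.toNat + 1) m 1 0 = _
      simp only [altCountLoop]
      rw [if_pos (by exact_mod_cast hm1)]
      norm_num
    have ed : PySem.Int.floordiv m ((1 : Int) * 10) = n := by
      have := (divmodstep n dv 1 hn h0 h9 (by norm_num)).1
      rw [hmdef, this, floordiv_one]
    have ecur : PySem.Int.mod (PySem.Int.floordiv m 1) 10 = dv := by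
      rw [floordiv_one]
      have := (divmodstep n dv 1 hn h0 h9 (by norm_num)).2
      rw [show ((1 : Int) * 10) = 10 by ring] at this
      rw [hmdef, this, mod_one]
      ring
    rw [hstep, accA, ed, ecur, mod_one]
    rw [mainB (m.toNat) n dv 1 hn h0 h9 (by norm_num)]
    have es1 : altCountLoop m.toNat n 1 0 = balt n := by
      unfold balt
      apply suffA m.toNat (n.toNat + 1) n 1 0 (by norm_num) (by omega) (by omega)
    have es2 : cnt5 m.toNat n 1 = cntN n := by
      unfold cntN
      apply suffC m.toNat (n.toNat + 1) n 1 (by norm_num) (by omega) (by omega)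
    rw [es1, es2]
    unfold bonus5
    split_ifs <;> ring

theorem CRec (n dv : Int) (hn : 0 ≤ n) (h0 : 0 ≤ dv) (h9 : dv ≤ 9) :
    cntN (10 * n + dv) = (if dv = 5 then (1 : Int) else 0) + cntN n := by
  by_cases hm : 10 * n + dv ≤ 0
  · have hn0 : n = 0 := by omega
    have hd0 : dv = 0 := by omega
    subst hn0; subst hd0
    norm_num [cntN, cnt5]
  · have hm1 : 1 ≤ 10 * n + dv := by omega
    set m : Int := 10 * n + dv with hmdef
    have hstep : cntN m
        = (if PySem.Int.mod (PySem.Int.floordiv m 1) 10 = 5 then (1 : Int) else 0)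
          + cnt5 m.toNat m (1 * 10) := by
      show cnt5 (m.toNat + 1) m 1 = _
      simp only [cnt5]
      rw [if_pos (by exact_mod_cast hm1)]
      norm_num
    have ecur : PySem.Int.mod (PySem.Int.floordiv m 1) 10 = dv := by
      rw [floordiv_one]
      have := (divmodstep n dv 1 hn h0 h9 (by norm_num)).2
      rw [show ((1 : Int) * 10) = 10 by ring] at this
      rw [hmdef, this, mod_one]
      ring
    rw [hstep, ecur]
    rw [shiftC m.toNat n dv 1 hn h0 h9 (by norm_num)]
    have es2 : cnt5 m.toNat n 1 = cntN n := by
      unfold cntN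
      apply suffC m.toNat (n.toNat + 1) n 1 (by norm_num) (by omega) (by omega)
    rw [es2]

-- ---- the combined induction ----

theorem MAIN : ∀ cs : List Char, cs.all PySem.Chars.isdigit = true →
    sumA cs = balt ((natN cs : Nat) : Int) ∧ C5 cs = cntN ((natN cs : Nat) : Int) := by
  intro cs
  induction cs using List.reverseRecOn with
  | nil =>
    intro _
    constructor
    · show sumA [] = balt 0
      simp [sumA, balt, altCountLoop, natN, natNA]
    · show C5 [] = cntN 0
      simp [C5, cntN, cnt5, natN, natNA]
  | append_singleton cs c ih =>
    intro hall
    have hcs : cs.all PySem.Chars.isdigit = true := by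
      rw [List.all_eq_true] at hall ⊢
      intro x hx; exact hall x (List.mem_append_left _ hx)
    have hc : PySem.Chars.isdigit c = true :=
      List.all_eq_true.mp hall c (List.mem_append_right _ (List.mem_singleton.mpr rfl))
    obtain ⟨ihS, ihC⟩ := ih hcs
    have hb := digit_bounds c hc
    have hd0 : (0 : Int) ≤ ((c.toNat - '0'.toNat : Nat) : Int) := by positivity
    have hd9 : ((c.toNat - '0'.toNat : Nat) : Int) ≤ 9 := by
      have : c.toNat - '0'.toNat ≤ 9 := by
        have : '0'.toNat = 48 := by decide
        omega
      exact_mod_cast this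
    have hn0 : (0 : Int) ≤ ((natN cs : Nat) : Int) := by positivity
    have hval : ((natN (cs ++ [c]) : Nat) : Int)
        = 10 * ((natN cs : Nat) : Int) + ((c.toNat - '0'.toNat : Nat) : Int) := by
      show ((natNA (cs ++ [c]) 0 : Nat) : Int) = _
      rw [natNA_snoc]
      push_cast
      simp only [natN]
      ring
    constructor
    · rw [sumA_snoc, valSum_eq_natN, ihS, ihC, hval,
        BRec ((natN cs : Nat) : Int) _ hn0 hd0 hd9]
      try ring
    · rw [C5_snoc, ihC, hval, CRec ((natN cs : Nat) : Int) _ hn0 hd0 hd9]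
      try ring

-- ===== VERDICT (by name: the statement is the Claim_ definition above) =====
theorem the_solution_spec : Claim_equal_the_solution := by
  intro num _hdom hpre
  unfold Spec_the_solution
  rw [A1 num hpre, B1 num hpre, (MAIN num.toList hpre).1]
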